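-- pv_equiv track=rewrite | github.com/superY-25/algorithm-learning | src/algorithm/20190902-day1.py | lastNoK
-- ===== SOURCE A (Python) =====
-- def lastNoK(nums, k):
--     """
--     输出单链表中的倒数第k个元素值, 这里假设python list是一个单链表
--     :param nums:
--     :param k:
--     :return:
--     """
--     nums_len = len(nums)
--     if k > nums_len:
--         return None
--     pre, cur, i = 0, 0, 0
--     for n in nums:
--         cur += 1
--         if i >= k:
--             pre += 1
--         i += 1
--     return nums[pre]
-- ===== SOURCE B (Python) =====
-- def lastNoK(nums, k):
--     # Sliding-window buffer: keep only the last k elements seen; after one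
--     # pass the window's first element is the k-th from the end. No len-k
--     # index arithmetic is computed anywhere.
--     window = []
--     for n in nums:
--         window.append(n)
--         if len(window) > k:
--             window.pop(0)
--     if len(window) < k:
--         return None
--     return window[0]
-- ===== Notes on version B (the rewrite author's own statement) =====
-- stated objective: alternative
-- what changed: Replaced A's counting fold that derives the index len-k and then indexes into the list by a sliding-window buffer of the last k elements maintained in one pass, whose first element is the answer (None when the window never fills).
import Mathlib
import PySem

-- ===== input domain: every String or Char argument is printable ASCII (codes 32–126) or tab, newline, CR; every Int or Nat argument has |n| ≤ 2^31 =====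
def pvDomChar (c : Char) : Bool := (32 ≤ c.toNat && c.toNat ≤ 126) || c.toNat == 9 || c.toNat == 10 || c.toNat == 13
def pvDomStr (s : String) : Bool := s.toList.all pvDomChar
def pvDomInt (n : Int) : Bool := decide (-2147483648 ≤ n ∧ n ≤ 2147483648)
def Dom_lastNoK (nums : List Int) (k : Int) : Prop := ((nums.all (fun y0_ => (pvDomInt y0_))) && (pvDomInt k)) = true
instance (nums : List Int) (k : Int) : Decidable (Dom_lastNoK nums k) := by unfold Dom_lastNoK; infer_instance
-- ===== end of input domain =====

-- B replaces A's index-counting fold by a sliding-window buffer of the last k elements (alternative data-structure, not faster).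


-- ===== PORT A =====
def lastNoK (nums : List Int) (k : Int) : Option Int :=
  let numsLen : Int := nums.length
  if k > numsLen then none
  else
    -- pre, cur, i = 0, 0, 0; for n in nums: cur += 1; if i >= k: pre += 1; i += 1
    let st := nums.foldl (fun (s : Int × Int × Int) _ =>
      let pre := s.1; let cur := s.2.1; let i := s.2.2
      let cur := cur + 1
      let pre := if i ≥ k then pre + 1 else pre
      (pre, cur, i + 1)) (0, 0, 0)
    PySem.List.pyGet? nums st.1   -- nums[pre] (none = IndexError, excluded by Pre_)

-- ===== PORT B =====
-- loop body: window.append(n); if len(window) > k: window.pop(0)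
-- (pop(0) = tail; the list was just appended to, so it is nonempty)
def lastNoKStep (k : Int) (w : List Int) (n : Int) : List Int :=
  let w := w ++ [n]
  if (w.length : Int) > k then w.tail else w

def lastNoK_alt (nums : List Int) (k : Int) : Option Int :=
  let window := nums.foldl (lastNoKStep k) []
  if (window.length : Int) < k then none
  else PySem.List.pyGet? window 0   -- window[0] (none = IndexError, excluded by Pre_)

-- ===== PRECONDITION & SPEC =====
-- Pre_ excludes exactly k ≤ 0, where Python A (and B alike) raises IndexError.
def Pre_lastNoK (nums : List Int) (k : Int) : Prop := 0 < k
instance (nums : List Int) (k : Int) : Decidable (Pre_lastNoK nums k) := by unfold Pre_lastNoK; infer_instance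
def pvWitness_lastNoK : List Int × Int := ([3, 1, 4, 1, 5], 2)

def Spec_lastNoK (nums : List Int) (k : Int) (out : Option Int) : Prop := out = lastNoK_alt nums k
instance (nums : List Int) (k : Int) (out : Option Int) : Decidable (Spec_lastNoK nums k out) := by unfold Spec_lastNoK; infer_instance

-- ===== CLAIM (what is proved, stated in full; the proofs are below) =====
def Claim_equal_lastNoK : Prop := ∀ (nums : List Int) (k : Int), Dom_lastNoK nums k → Pre_lastNoK nums k → Spec_lastNoK nums k (lastNoK nums k)

-- ===== LEMMAS AND PROOFS =====

-- A's fold, once the counter i has reached k: every remaining step bumps pre.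
theorem lastNoK_foldA_ge (k : Int) (l : List Int) : ∀ (p c i : Int), k ≤ i →
    (l.foldl (fun (s : Int × Int × Int) _ =>
      let pre := s.1; let cur := s.2.1; let iv := s.2.2
      let cur := cur + 1
      let pre := if iv ≥ k then pre + 1 else pre
      (pre, cur, iv + 1)) (p, c, i)).1 = p + l.length := by
  induction l with
  | nil => intro p c i h; simp
  | cons x t ih =>
      intro p c i h
      simp only [List.foldl_cons]
      rw [if_pos h]
      rw [ih (p+1) (c+1) (i+1) (by omega)]
      simp; omega

-- A's fold, while i ≤ k: pre ends at p + max (i + len - k) 0.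
theorem lastNoK_foldA_le (k : Int) (l : List Int) : ∀ (p c i : Int), i ≤ k →
    (l.foldl (fun (s : Int × Int × Int) _ =>
      let pre := s.1; let cur := s.2.1; let iv := s.2.2
      let cur := cur + 1
      let pre := if iv ≥ k then pre + 1 else pre
      (pre, cur, iv + 1)) (p, c, i)).1 = p + max (i + l.length - k) 0 := by
  induction l with
  | nil => intro p c i h; simp; omega
  | cons x t ih =>
      intro p c i h
      simp only [List.foldl_cons]
      by_cases hik : i ≥ k
      · rw [if_pos hik]
        rw [lastNoK_foldA_ge k t (p+1) (c+1) (i+1) (by omega)]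
        simp; omega
      · rw [if_neg hik]
        rw [ih p (c+1) (i+1) (by omega)]
        simp; omega

-- B's window fold: starting from a window of length ≤ k, the final window is
-- the suffix of (w ++ l) of length min k (total length).
theorem lastNoK_foldB (k : Int) (hk : 0 < k) (l : List Int) : ∀ (w : List Int),
    w.length ≤ k.toNat →
    l.foldl (lastNoKStep k) w = (w ++ l).drop (w.length + l.length - k.toNat) := by
  induction l with
  | nil =>
      intro w h
      simp only [List.foldl_nil, List.append_nil, List.length_nil, Nat.add_zero]
      rw [Nat.sub_eq_zero_of_le h, List.drop_zero]
  | cons x t ih =>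
      intro w h
      simp only [List.foldl_cons]
      by_cases hfull : w.length = k.toNat
      · have hgt : ((w ++ [x]).length : Int) > k := by
          simp only [List.length_append, List.length_cons, List.length_nil, hfull]
          push_cast; omega
        have hw : w ≠ [] := by
          intro he; rw [he] at hfull; simp at hfull; omega
        rw [lastNoKStep, if_pos hgt]
        have htail : (w ++ [x]).tail = w.tail ++ [x] := by
          cases w with
          | nil => exact absurd rfl hw
          | cons a b => simp
        rw [htail, ih (w.tail ++ [x]) (by simp [List.length_tail]; omega)]
        have h1 : (w.tail ++ [x]) ++ t = (w ++ x :: t).tail := by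
          cases w with
          | nil => exact absurd rfl hw
          | cons a b => simp
        rw [h1, show (w ++ x :: t).tail = (w ++ x :: t).drop 1 from List.drop_one.symm, List.drop_drop]
        congr 1
        have hwpos : 0 < w.length := List.length_pos_of_ne_nil hw
        simp [List.length_tail, List.length_append, List.length_cons]
        omega
      · have hle : ((w ++ [x]).length : Int) ≤ k := by
          simp [List.length_append]; omega
        rw [lastNoKStep, if_neg (by omega)]
        rw [ih (w ++ [x]) (by simp [List.length_append]; omega)]
        simp [List.length_append, List.length_cons]
        omega

-- ===== VERDICT (by name: the statement is the Claim_ definition above) =====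
theorem lastNoK_spec : Claim_equal_lastNoK := by
  intro nums k _ hk
  unfold Spec_lastNoK lastNoK lastNoK_alt
  simp only [Pre_lastNoK] at hk
  rw [lastNoK_foldB k hk nums [] (by simp)]
  simp only [List.nil_append, List.length_nil, Nat.zero_add]
  by_cases hkl : k > (nums.length : Int)
  · simp only [if_pos hkl]
    have hdrop : nums.length - k.toNat = 0 := by omega
    rw [hdrop, List.drop_zero, if_pos (by omega)]
  · simp only [if_neg hkl]
    rw [lastNoK_foldA_le k nums 0 0 0 (by omega)]
    have hlen : (nums.drop (nums.length - k.toNat)).length = k.toNat := by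
      simp [List.length_drop]; omega
    rw [hlen, if_neg (by omega)]
    rw [PySem.List.pyGet?_of_nonneg _ (by omega),
        PySem.List.pyGet?_of_nonneg _ (by omega)]
    rw [List.getElem?_drop]
    congr 1
    omega
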